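-- pv_equiv track=rewrite | github.com/kevinros/contextAndConnections | data_cleaners/basic_data_gathering_preprocessing.py | count_comments_in_same_post_as_another
-- ===== SOURCE A (Python) =====
-- def count_comments_in_same_post_as_another(comments: dict) -> int:
--     memo = {}
--     count = 0
--     for comment in comments:
--         if comment["link_id"] in memo:
--             count += 1
--         else:
--             memo[comment["link_id"]] = comment
--     return count
-- ===== SOURCE B (Python) =====
-- def count_comments_in_same_post_as_another(comments: dict) -> int:
--     # Sort the link_ids; duplicates become adjacent, so each comment that
--     # shares a link_id with an earlier one contributes one equal adjacent pair.
--     ids = sorted(comment["link_id"] for comment in comments)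
--     dup = 0
--     for prev, cur in zip(ids, ids[1:]):
--         if cur == prev:
--             dup += 1
--     return dup
-- ===== Notes on version B (the rewrite author's own statement) =====
-- stated objective: alternative
-- what changed: B replaces A's hash-memo membership pass with a sort-then-scan: it sorts the link_ids, then counts equal adjacent pairs, which equals the number of comments whose link_id occurred earlier.
import Mathlib
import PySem

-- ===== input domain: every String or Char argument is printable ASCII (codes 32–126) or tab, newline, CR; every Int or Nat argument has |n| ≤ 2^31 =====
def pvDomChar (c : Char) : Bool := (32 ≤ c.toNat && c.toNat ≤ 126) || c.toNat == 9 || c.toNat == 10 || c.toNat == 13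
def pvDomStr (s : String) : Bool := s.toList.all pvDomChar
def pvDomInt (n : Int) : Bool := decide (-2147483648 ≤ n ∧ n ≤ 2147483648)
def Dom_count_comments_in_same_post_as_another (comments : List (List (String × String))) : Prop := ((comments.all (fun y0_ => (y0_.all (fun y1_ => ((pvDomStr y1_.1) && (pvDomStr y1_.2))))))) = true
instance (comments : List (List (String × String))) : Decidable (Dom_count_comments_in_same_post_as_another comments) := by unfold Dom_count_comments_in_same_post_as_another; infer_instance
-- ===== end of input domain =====

-- B replaces A's hash-memo membership pass by sort-then-scan: sort the link_ids
-- and count equal adjacent pairs. (Equivalence is about the return value; neither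
-- program mutates its argument.)

-- comment["link_id"] (total under Pre_, which requires the key to be present)
def pvLinkId (c : List (String × String)) : String :=
  (PySem.Dict.mk c).getD "link_id" ""

-- ===== PORT A =====
def count_comments_in_same_post_as_another (comments : List (List (String × String))) : Int :=
  (comments.foldl
    (fun (st : PySem.Dict String (List (String × String)) × Int) comment =>
      if st.1.contains (pvLinkId comment) then (st.1, st.2 + 1)
      else (st.1.insert (pvLinkId comment) comment, st.2))
    (PySem.Dict.empty, 0)).2

-- ===== PORT B =====
def count_comments_in_same_post_as_another_alt (comments : List (List (String × String))) : Int :=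
  let ids := PySem.List.sorted (comments.map (fun comment => pvLinkId comment)) (fun x => x) false
  (ids.zip (PySem.List.slice ids (some 1) none)).foldl
    (fun dup p => if p.2 == p.1 then dup + 1 else dup) 0

-- ===== PRECONDITION & SPEC =====
-- Pre_ excludes comments missing the "link_id" key, on which the Python A (and B) raises KeyError.
def Pre_count_comments_in_same_post_as_another (comments : List (List (String × String))) : Prop :=
  ∀ c ∈ comments, "link_id" ∈ c.map (·.1)
instance (comments : List (List (String × String))) : Decidable (Pre_count_comments_in_same_post_as_another comments) := by unfold Pre_count_comments_in_same_post_as_another; infer_instance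
def pvWitness_count_comments_in_same_post_as_another : (List (List (String × String))) :=
  [[("link_id", "p1"), ("body", "hi")], [("link_id", "p2")], [("link_id", "p1")]]

def Spec_count_comments_in_same_post_as_another (comments : List (List (String × String))) (out : Int) : Prop := out = count_comments_in_same_post_as_another_alt comments
instance (comments : List (List (String × String))) (out : Int) : Decidable (Spec_count_comments_in_same_post_as_another comments out) := by unfold Spec_count_comments_in_same_post_as_another; infer_instance

-- ===== CLAIM (what is proved, stated in full; the proofs are below) =====
def Claim_equal_count_comments_in_same_post_as_another : Prop := ∀ (comments : List (List (String × String))), Dom_count_comments_in_same_post_as_another comments → Pre_count_comments_in_same_post_as_another comments → Spec_count_comments_in_same_post_as_another comments (count_comments_in_same_post_as_another comments)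

-- ===== LEMMAS AND PROOFS =====

-- A's loop: the running count is (processed length) + |memo keys at start| − |ids seen ∪ memo keys|.
lemma pv_a_inv (l : List (List (String × String)))
    (memo : PySem.Dict String (List (String × String))) (count : Int) :
    (l.foldl
      (fun (st : PySem.Dict String (List (String × String)) × Int) comment =>
        if st.1.contains (pvLinkId comment) then (st.1, st.2 + 1)
        else (st.1.insert (pvLinkId comment) comment, st.2))
      (memo, count)).2
    = count + (l.length : Int) + (memo.keys.toFinset.card : Int)
      - ((((l.map pvLinkId).toFinset ∪ memo.keys.toFinset).card : Int)) := by
  induction l generalizing memo count with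
  | nil => simp
  | cons c rest ih =>
    simp only [List.foldl_cons, List.map_cons, List.length_cons, List.toFinset_cons]
    by_cases h : memo.contains (pvLinkId c) = true
    · rw [if_pos h]
      have hmem : pvLinkId c ∈ memo.keys.toFinset := by
        simpa using (PySem.Dict.contains_iff_mem_keys (d := memo) (k := pvLinkId c)).mp h
      rw [ih]
      rw [Finset.insert_union, Finset.insert_eq_self.mpr (Finset.mem_union_right _ hmem)]
      push_cast; ring
    · rw [if_neg (by simp [h])]
      rw [ih]
      have hnmem : pvLinkId c ∉ memo.keys := by
        intro hm
        exact h ((PySem.Dict.contains_iff_mem_keys (d := memo) (k := pvLinkId c)).mpr hm)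
      have hkeys : (memo.insert (pvLinkId c) c).keys = memo.keys ++ [pvLinkId c] :=
        PySem.Dict.keys_insert_of_not_contains _ _ (by
          simp only [Bool.not_eq_true] at h; exact h)
      rw [hkeys]
      have htf : (memo.keys ++ [pvLinkId c]).toFinset = insert (pvLinkId c) memo.keys.toFinset := by
        simp [List.toFinset_append, Finset.union_comm]
      rw [htf]
      have hcard : (insert (pvLinkId c) memo.keys.toFinset).card = memo.keys.toFinset.card + 1 :=
        Finset.card_insert_of_notMem (by simpa using hnmem)
      rw [hcard, Finset.union_insert, Finset.insert_union]
      push_cast; ring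

-- B's scan: on a sorted (Pairwise ≤) list, the number of equal adjacent pairs is
-- length − number of distinct elements.
lemma pv_b_adj (s : List String) (hs : s.Pairwise (· ≤ ·)) (d : Int) :
    (s.zip s.tail).foldl (fun dup p => if p.2 == p.1 then dup + 1 else dup) d
    = d + (s.length : Int) - (s.toFinset.card : Int) := by
  induction s generalizing d with
  | nil => simp
  | cons a t ih =>
    cases t with
    | nil => simp
    | cons b rest =>
      have ha : ∀ x ∈ b :: rest, a ≤ x := (List.pairwise_cons.mp hs).1
      have hp' : (b :: rest).Pairwise (· ≤ ·) := (List.pairwise_cons.mp hs).2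
      simp only [List.tail_cons, List.zip_cons_cons, List.foldl_cons]
      have ih' := ih hp'
      simp only [List.tail_cons] at ih'
      by_cases hab : b = a
      · rw [if_pos (by simp [hab])]
        rw [ih' (d + 1)]
        subst hab
        simp only [List.toFinset_cons, List.length_cons]
        rw [Finset.insert_idem]
        push_cast; ring
      · rw [if_neg (by simp [hab])]
        rw [ih' d]
        have hanotin : a ∉ (b :: rest).toFinset := by
          simp only [List.mem_toFinset, List.mem_cons]
          rintro (rfl | hx)
          · exact hab rfl
          · have hab' : a < b := lt_of_le_of_ne (ha b (by simp)) (fun e => hab e.symm)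
            have hbx : b ≤ a := ((List.pairwise_cons.mp hp').1) a hx
            exact absurd (lt_of_lt_of_le hab' hbx) (lt_irrefl a)
        have hA' : a ∉ insert b rest.toFinset := by
          simpa [List.toFinset_cons] using hanotin
        simp only [List.toFinset_cons, List.length_cons]
        rw [Finset.card_insert_of_notMem hA']
        push_cast; ring

-- ===== VERDICT (by name: the statement is the Claim_ definition above) =====
theorem count_comments_in_same_post_as_another_spec : Claim_equal_count_comments_in_same_post_as_another := by
  intro comments _ _
  unfold Spec_count_comments_in_same_post_as_another
  unfold count_comments_in_same_post_as_another count_comments_in_same_post_as_another_alt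
  have hA := pv_a_inv comments PySem.Dict.empty 0
  set ids := comments.map (fun comment => pvLinkId comment) with hids
  have hsorted : (PySem.List.sorted ids (fun x => x) false).Pairwise (· ≤ ·) := by
    simpa using PySem.List.sorted_pairwise (xs := ids) (key := fun x => x)
  have hperm : (PySem.List.sorted ids (fun x => x) false).Perm ids :=
    PySem.List.sorted_perm _ _ _
  have hB := pv_b_adj (PySem.List.sorted ids (fun x => x) false) hsorted 0
  dsimp only
  rw [PySem.List.slice_from_one, hB, hperm.length_eq, List.toFinset_eq_of_perm _ _ hperm, hA]
  simp [hids]
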